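-- pv_equiv track=rewrite | github.com/richard-timpson/solar-panel-output-prediction | code/DataCleaning/train_test_split.py | get_category_map
-- ===== SOURCE A (Python) =====
-- def get_category_map(row_lists, idx=4):
--
--     category_map = {}
--     next_idx = 0
--
--     for row_list in row_lists:
--         for row in row_list:
--             val = row[idx]
--
--             # Includes a "none" category for ""
--             if val not in category_map:
--                 category_map[row[idx]] = next_idx
--                 next_idx += 1
--
--     return category_map
-- ===== SOURCE B (Python) =====
-- def get_category_map(row_lists, idx=4):
--     vals = [row[idx] for row_list in row_lists for row in row_list]
--     # backwards overwrite pass: last write wins, so each value ends up at its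
--     # FIRST occurrence position
--     first = {}
--     for pos, val in reversed(list(enumerate(vals))):
--         first[val] = pos
--     # rank the distinct values by first-occurrence position
--     return {val: rank for rank, val in enumerate(sorted(first, key=first.get))}
-- ===== Notes on version B (the rewrite author's own statement) =====
-- stated objective: alternative
-- what changed: B has no membership test and no counter: a backwards overwrite pass records each distinct value's first-occurrence position, then the distinct values are sorted by that position and indices assigned by rank.
import Mathlib
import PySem

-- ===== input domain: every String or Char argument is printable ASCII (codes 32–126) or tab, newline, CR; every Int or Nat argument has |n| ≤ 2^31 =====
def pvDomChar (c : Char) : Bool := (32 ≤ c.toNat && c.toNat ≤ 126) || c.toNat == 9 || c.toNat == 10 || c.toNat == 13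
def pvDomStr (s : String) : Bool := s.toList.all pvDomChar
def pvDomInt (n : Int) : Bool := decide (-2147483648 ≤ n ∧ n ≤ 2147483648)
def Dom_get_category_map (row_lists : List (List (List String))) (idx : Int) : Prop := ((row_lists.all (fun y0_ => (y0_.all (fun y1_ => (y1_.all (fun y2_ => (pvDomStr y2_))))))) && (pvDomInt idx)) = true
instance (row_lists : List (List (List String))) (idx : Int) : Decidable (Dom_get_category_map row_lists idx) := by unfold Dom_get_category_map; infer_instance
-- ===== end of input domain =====

-- B replaces A's counter-threading membership loop by a backwards overwrite pass recording
-- first-occurrence positions plus a sort of the distinct values by that position; alternative, not faster.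

-- ===== PORT A =====
-- nested for-loops threading (category_map, next_idx); row[idx] is pyGetD, exact under Pre_ (in-range index)
def get_category_map (row_lists : List (List (List String))) (idx : Int) : List (String × Int) :=
  let st := row_lists.foldl
    (fun st row_list =>
      row_list.foldl
        (fun st row =>
          let val := PySem.List.pyGetD row idx ""
          if st.1.contains val then st else (st.1.insert val st.2, st.2 + 1))
        st)
    ((PySem.Dict.empty : PySem.Dict String Int), (0 : Int))
  st.1.items

-- ===== PORT B =====
-- comprehension flattening all values; backwards loop over reversed(list(enumerate(vals)))
-- overwriting first[val] = pos; sorted(first, key=first.get) sorts the dict's keys by their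
-- stored value (keys are all present, so first.get v is that int — ported as getD v 0);
-- final dict comprehension has distinct keys, so its items are exactly this map
def get_category_map_alt (row_lists : List (List (List String))) (idx : Int) : List (String × Int) :=
  let vals := row_lists.flatMap (fun row_list => row_list.map (fun row => PySem.List.pyGetD row idx ""))
  let first := (PySem.List.enumerate vals 0).reverse.foldl
    (fun d p => d.insert p.2 p.1) (PySem.Dict.empty : PySem.Dict String Int)
  let order := PySem.List.sorted first.keys (fun v => first.getD v 0) false
  (PySem.List.enumerate order 0).map (fun p => (p.2, p.1))

-- ===== PRECONDITION & SPEC =====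
-- Pre_ excludes exactly the inputs where row[idx] raises IndexError in both A and B
def Pre_get_category_map (row_lists : List (List (List String))) (idx : Int) : Prop :=
  ∀ row_list ∈ row_lists, ∀ row ∈ row_list, PySem.Raise.InRange row.length idx
instance (row_lists : List (List (List String))) (idx : Int) : Decidable (Pre_get_category_map row_lists idx) := by unfold Pre_get_category_map; infer_instance
def pvWitness_get_category_map : List (List (List String)) × Int :=
  ([[["a", "b", "c", "d", "x"], ["a", "b", "c", "d", "y"]], [[ "a", "b", "c", "d", "x"]]], 4)

def Spec_get_category_map (row_lists : List (List (List String))) (idx : Int) (out : List (String × Int)) : Prop := out = get_category_map_alt row_lists idx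
instance (row_lists : List (List (List String))) (idx : Int) (out : List (String × Int)) : Decidable (Spec_get_category_map row_lists idx out) := by unfold Spec_get_category_map; infer_instance

-- ===== CLAIM (what is proved, stated in full; the proofs are below) =====
def Claim_equal_get_category_map : Prop := ∀ (row_lists : List (List (List String))) (idx : Int), Dom_get_category_map row_lists idx → Pre_get_category_map row_lists idx → Spec_get_category_map row_lists idx (get_category_map row_lists idx)

-- ===== LEMMAS AND PROOFS =====

-- the step of A's loop, on an already-extracted value
def pvStep (st : PySem.Dict String Int × Int) (v : String) : PySem.Dict String Int × Int :=
  if st.1.contains v then st else (st.1.insert v st.2, st.2 + 1)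

-- keys of the dict A will newly insert while scanning vs, given the keys ks already present
def pvNew (ks : List String) : List String → List String
  | [] => []
  | v :: vs => if v ∈ ks then pvNew ks vs else v :: pvNew (ks ++ [v]) vs

-- B's backwards-built dict, structurally: insert v at offset AFTER building the tail's dict
def pvBuild : List String → Int → PySem.Dict String Int
  | [], _ => PySem.Dict.empty
  | v :: t, off => (pvBuild t (off + 1)).insert v off

-- position of the first occurrence of v in vs (meaningful when v ∈ vs)
def pvFirstIdx : List String → String → Int
  | [], _ => 0
  | x :: t, v => if x = v then 0 else pvFirstIdx t v + 1

lemma pvFirstIdx_nonneg (vs : List String) (v : String) : 0 ≤ pvFirstIdx vs v := by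
  induction vs with
  | nil => simp [pvFirstIdx]
  | cons x t ih =>
    by_cases h : x = v
    · simp [pvFirstIdx, h]
    · simp only [pvFirstIdx, if_neg h]; omega

lemma pvBuild_foldr (vs : List String) : ∀ (off : Int),
    (PySem.List.enumerate vs off).foldr (fun p d => d.insert p.2 p.1)
      (PySem.Dict.empty : PySem.Dict String Int) = pvBuild vs off := by
  induction vs with
  | nil => intro off; simp [PySem.List.enumerate_nil, pvBuild]
  | cons v t ih =>
    intro off
    rw [PySem.List.enumerate_cons, List.foldr_cons, ih (off + 1)]
    rfl

lemma pvBuild_eq_foldl (vs : List String) (off : Int) :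
    (PySem.List.enumerate vs off).reverse.foldl (fun d p => d.insert p.2 p.1)
      (PySem.Dict.empty : PySem.Dict String Int) = pvBuild vs off := by
  rw [List.foldl_reverse, ← pvBuild_foldr vs off]

lemma pvBuild_get? (vs : List String) : ∀ (off : Int) (v : String),
    (pvBuild vs off).get? v = if v ∈ vs then some (off + pvFirstIdx vs v) else none := by
  induction vs with
  | nil => intro off v; simp [pvBuild, PySem.Dict.get?_empty]
  | cons x t ih =>
    intro off v
    by_cases hv : v = x
    · subst hv
      simp [pvBuild, PySem.Dict.get?_insert_self, pvFirstIdx]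
    · rw [pvBuild, PySem.Dict.get?_insert_of_ne _ _ hv, ih (off + 1) v]
      have hxv : ¬ (x = v) := fun h => hv h.symm
      simp only [List.mem_cons, hv, false_or, pvFirstIdx, if_neg hxv]
      by_cases hm : v ∈ t
      · simp [hm]
        omega
      · simp [hm]

lemma pvBuild_mem_keys (vs : List String) (off : Int) (v : String) :
    v ∈ (pvBuild vs off).keys ↔ v ∈ vs := by
  rw [← PySem.Dict.contains_iff_mem_keys, PySem.Dict.contains_eq_isSome_get?, pvBuild_get?]
  by_cases h : v ∈ vs <;> simp [h]

lemma pvBuild_nodup_keys (vs : List String) : ∀ (off : Int), (pvBuild vs off).keys.Nodup := by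
  induction vs with
  | nil => intro off; exact PySem.Dict.nodup_keys_empty
  | cons x t ih => intro off; exact PySem.Dict.nodup_keys_insert _ _ _ (ih (off + 1))

-- members of pvNew ks vs: in vs, not in ks
lemma pvNew_mem (vs : List String) : ∀ (ks : List String) (a : String),
    a ∈ pvNew ks vs → a ∈ vs ∧ a ∉ ks := by
  induction vs with
  | nil => intro ks a h; simp [pvNew] at h
  | cons v t ih =>
    intro ks a h
    by_cases hv : v ∈ ks
    · simp only [pvNew, if_pos hv] at h
      have := ih ks a h
      exact ⟨List.mem_cons_of_mem _ this.1, this.2⟩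
    · simp only [pvNew, if_neg hv] at h
      rcases List.mem_cons.mp h with rfl | h
      · exact ⟨List.mem_cons_self, hv⟩
      · have := ih (ks ++ [v]) a h
        refine ⟨List.mem_cons_of_mem _ this.1, fun hk => this.2 (List.mem_append_left _ hk)⟩

lemma pvNew_mem_of (vs : List String) : ∀ (ks : List String) (a : String),
    a ∈ vs → a ∉ ks → a ∈ pvNew ks vs := by
  induction vs with
  | nil => intro ks a h; simp at h
  | cons v t ih =>
    intro ks a hmem hks
    by_cases hv : v ∈ ks
    · have ha : a ∈ t := by
        rcases List.mem_cons.mp hmem with rfl | h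
        · exact absurd hv hks
        · exact h
      simpa [pvNew, if_pos hv] using ih ks a ha hks
    · simp only [pvNew, if_neg hv]
      rcases List.mem_cons.mp hmem with rfl | h
      · exact List.mem_cons_self
      · by_cases hav : a = v
        · subst hav; exact List.mem_cons_self
        · exact List.mem_cons_of_mem _ (ih (ks ++ [v]) a h (by simp [hks, hav]))

lemma pvNew_nodup (vs : List String) : ∀ (ks : List String), (pvNew ks vs).Nodup := by
  induction vs with
  | nil => intro ks; simp [pvNew]
  | cons v t ih =>
    intro ks
    by_cases hv : v ∈ ks
    · simpa [pvNew, if_pos hv] using ih ks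
    · simp only [pvNew, if_neg hv]
      refine List.Nodup.cons (fun h => ?_) (ih (ks ++ [v]))
      exact (pvNew_mem t (ks ++ [v]) v h).2 (List.mem_append_right _ List.mem_cons_self)

-- pvNew lists values in strictly increasing first-occurrence order
lemma pvNew_pairwise (vs : List String) : ∀ (ks : List String),
    (pvNew ks vs).Pairwise (fun a b => pvFirstIdx vs a < pvFirstIdx vs b) := by
  induction vs with
  | nil => intro ks; simp [pvNew]
  | cons v t ih =>
    intro ks
    by_cases hv : v ∈ ks
    · simp only [pvNew, if_pos hv]
      refine (ih ks).imp_of_mem ?_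
      intro a b ha hb hab
      have hav : a ≠ v := fun h => (pvNew_mem t ks a ha).2 (h ▸ hv)
      have hbv : b ≠ v := fun h => (pvNew_mem t ks b hb).2 (h ▸ hv)
      simp only [pvFirstIdx, if_neg (Ne.symm hav), if_neg (Ne.symm hbv)]
      omega
    · simp only [pvNew, if_neg hv]
      refine List.Pairwise.cons ?_ ?_
      · intro b hb
        have hbv : b ≠ v := fun h =>
          (pvNew_mem t (ks ++ [v]) b hb).2 (h ▸ List.mem_append_right _ List.mem_cons_self)
        have := pvFirstIdx_nonneg t b
        simp [pvFirstIdx, Ne.symm hbv]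
        omega
      · refine (ih (ks ++ [v])).imp_of_mem ?_
        intro a b ha hb hab
        have hav : a ≠ v := fun h =>
          (pvNew_mem t (ks ++ [v]) a ha).2 (h ▸ List.mem_append_right _ List.mem_cons_self)
        have hbv : b ≠ v := fun h =>
          (pvNew_mem t (ks ++ [v]) b hb).2 (h ▸ List.mem_append_right _ List.mem_cons_self)
        simp only [pvFirstIdx, if_neg (Ne.symm hav), if_neg (Ne.symm hbv)]
        omega

-- B's sort of the distinct values by first-occurrence position IS A's insertion order
lemma pvSorted_keys (vs : List String) :
    PySem.List.sorted (pvBuild vs 0).keys (fun v => (pvBuild vs 0).getD v 0) false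
      = pvNew [] vs := by
  apply PySem.List.sorted_eq_of_perm_of_pairwise_lt
  · rw [List.perm_ext_iff_of_nodup (pvNew_nodup vs []) (pvBuild_nodup_keys vs 0)]
    intro a
    rw [pvBuild_mem_keys]
    constructor
    · exact fun h => (pvNew_mem vs [] a h).1
    · exact fun h => pvNew_mem_of vs [] a h (by simp)
  · refine (pvNew_pairwise vs []).imp_of_mem ?_
    intro a b ha hb hab
    have ha' : a ∈ vs := (pvNew_mem vs [] a ha).1
    have hb' : b ∈ vs := (pvNew_mem vs [] b hb).1
    rw [PySem.Dict.getD_eq_get?_getD, PySem.Dict.getD_eq_get?_getD,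
      pvBuild_get?, pvBuild_get?]
    simpa [ha', hb'] using hab

lemma pvLoop_items (vs : List String) : ∀ (d : PySem.Dict String Int) (n : Int),
    d.keys.Nodup →
    (vs.foldl pvStep (d, n)).1.items
      = d.items ++ (PySem.List.enumerate (pvNew d.keys vs) n).map (fun p => (p.2, p.1)) := by
  induction vs with
  | nil => intro d n _; simp [pvNew]
  | cons v vs ih =>
    intro d n hnd
    by_cases hv : v ∈ d.keys
    · have hc : d.contains v = true := by
        simpa [PySem.Dict.contains_iff_mem_keys] using hv
      simp [List.foldl_cons, pvStep, hc, pvNew, hv, ih d n hnd]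
    · have hc : d.contains v = false := by
        rw [← Bool.not_eq_true, PySem.Dict.contains_iff_mem_keys]; exact hv
      have hkeys : (d.insert v n).keys = d.keys ++ [v] :=
        PySem.Dict.keys_insert_of_not_contains d n hc
      have hnd' : (d.insert v n).keys.Nodup := by
        rw [hkeys]; exact List.Nodup.append hnd (List.nodup_singleton v) (by simpa using hv)
      have hitems : (d.insert v n).items = d.items ++ [(v, n)] :=
        PySem.Dict.items_insert_of_not_contains d n hc
      have := ih (d.insert v n) (n + 1) hnd'
      simp [List.foldl_cons, pvStep, hc, pvNew, hv, this, hkeys, hitems,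
        PySem.List.enumerate_cons]

-- A's nested loop, as a single fold over the flattened value list
lemma pvFlatten (row_lists : List (List (List String))) (idx : Int)
    (init : PySem.Dict String Int × Int) :
    row_lists.foldl
      (fun st row_list =>
        row_list.foldl
          (fun st row =>
            let val := PySem.List.pyGetD row idx ""
            if st.1.contains val then st else (st.1.insert val st.2, st.2 + 1))
          st)
      init
    = (row_lists.flatMap (fun row_list => row_list.map (fun row => PySem.List.pyGetD row idx ""))).foldl
        pvStep init := by
  induction row_lists generalizing init with
  | nil => rfl
  | cons rl rls ih =>
    simp only [List.foldl_cons, List.flatMap_cons, List.foldl_append, ih]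
    congr 1
    rw [List.foldl_map]
    rfl

-- ===== VERDICT (by name: the statement is the Claim_ definition above) =====
theorem get_category_map_spec : Claim_equal_get_category_map := by
  intro row_lists idx _ _
  show get_category_map row_lists idx = get_category_map_alt row_lists idx
  have h := pvLoop_items
    (row_lists.flatMap (fun row_list => row_list.map (fun row => PySem.List.pyGetD row idx "")))
    PySem.Dict.empty 0 (by simp)
  simp only [get_category_map, get_category_map_alt, pvFlatten, pvBuild_eq_foldl, pvSorted_keys]
  simp [PySem.Dict.empty] at h
  exact h
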